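-- pv_equiv track=rewrite | github.com/banma1234/KSU_study | 1st_week/Q_centauri.py | centauri
-- ===== SOURCE A (Python) =====
-- def centauri(x, y):
--     distance = y - x
--     count = 1
--     while True:
--         if count ** 2 <= distance < (count+1) ** 2:
--             break
--         count+=1
--     if count ** 2 == distance:
--         return count * 2 - 1
--     elif count ** 2 < distance <= count ** 2 + count:
--         return count * 2
--     else:
--         return count * 2 + 1
-- ===== SOURCE B (Python) =====
-- import math
--
-- def centauri(x, y):
--     d = y - x
--     c = math.isqrt(d)
--     if c * c == d:
--         return 2 * c - 1
--     if d <= c * c + c: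
--         return 2 * c
--     return 2 * c + 1
-- ===== Notes on version B (the rewrite author's own statement) =====
-- stated objective: alternative
-- what changed: Replaces the linear search for the integer square root of the distance (incrementing count until count^2 <= d < (count+1)^2) with a direct math.isqrt call followed by the same three-way branching; Pre_ requires y - x >= 1 because for distance <= 0 A loops forever (no count >= 1 ever satisfies the break condition).
import Mathlib
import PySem

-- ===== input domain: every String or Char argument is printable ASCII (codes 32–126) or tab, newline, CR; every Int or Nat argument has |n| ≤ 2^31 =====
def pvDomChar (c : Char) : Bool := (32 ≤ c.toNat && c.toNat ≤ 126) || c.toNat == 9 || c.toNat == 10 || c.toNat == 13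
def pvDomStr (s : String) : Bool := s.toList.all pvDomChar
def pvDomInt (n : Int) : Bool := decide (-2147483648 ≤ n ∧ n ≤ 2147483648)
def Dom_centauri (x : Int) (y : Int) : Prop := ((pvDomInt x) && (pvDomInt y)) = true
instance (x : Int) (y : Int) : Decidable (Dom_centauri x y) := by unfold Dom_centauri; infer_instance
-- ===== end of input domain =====

-- B replaces A's linear search for the integer square root of y - x by a direct
-- integer-sqrt computation (math.isqrt) with the same three-way branching.

-- ===== PORT A =====
-- A's `while True` loop: increment count until count^2 <= distance < (count+1)^2.
-- The extra `count < distance` test is only a totality guard: under Pre_ (distance ≥ 1)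
-- the loop always breaks at some count ≤ distance, so the guard never fires before the break.
def centauriLoop (distance : Int) (count : Int) : Int :=
  if count ^ 2 ≤ distance ∧ distance < (count + 1) ^ 2 then count
  else if count < distance then centauriLoop distance (count + 1)
  else count
termination_by (distance - count).toNat
decreasing_by omega

def centauri (x : Int) (y : Int) : Int :=
  let distance := y - x
  let count := centauriLoop distance 1
  if count ^ 2 = distance then count * 2 - 1
  else if count ^ 2 < distance ∧ distance ≤ count ^ 2 + count then count * 2
  else count * 2 + 1

-- ===== PORT B =====
-- math.isqrt d → Int.sqrt d (exact for d ≥ 0; d ≥ 1 on Pre_).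
def centauri_alt (x : Int) (y : Int) : Int :=
  let d := y - x
  let c := Int.sqrt d
  if c * c = d then 2 * c - 1
  else if d ≤ c * c + c then 2 * c
  else 2 * c + 1

-- ===== PRECONDITION & SPEC =====
-- Pre_ excludes distance y - x ≤ 0: there A's loop never breaks (count ≥ 1 ⇒ count² ≥ 1 > distance),
-- so A diverges and returns no value.
def Pre_centauri (x : Int) (y : Int) : Prop := 1 ≤ y - x
instance (x : Int) (y : Int) : Decidable (Pre_centauri x y) := by unfold Pre_centauri; infer_instance
def pvWitness_centauri : Int × Int := (0, 5)

def Spec_centauri (x : Int) (y : Int) (out : Int) : Prop := out = centauri_alt x y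
instance (x : Int) (y : Int) (out : Int) : Decidable (Spec_centauri x y out) := by unfold Spec_centauri; infer_instance

-- ===== CLAIM (what is proved, stated in full; the proofs are below) =====
def Claim_equal_centauri : Prop := ∀ (x : Int) (y : Int), Dom_centauri x y → Pre_centauri x y → Spec_centauri x y (centauri x y)

-- ===== LEMMAS AND PROOFS =====

-- Int.sqrt of a nonnegative integer satisfies the bracketing inequalities.
theorem int_sqrt_bounds (d : Int) (hd : 0 ≤ d) :
    Int.sqrt d * Int.sqrt d ≤ d ∧ d < (Int.sqrt d + 1) * (Int.sqrt d + 1) := by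
  have hdn : ((d.toNat : Nat) : Int) = d := Int.toNat_of_nonneg hd
  have h1 := Nat.sqrt_le' d.toNat
  have h2 := Nat.lt_succ_sqrt' d.toNat
  unfold Int.sqrt
  constructor
  · have : ((Nat.sqrt d.toNat ^ 2 : Nat) : Int) ≤ ((d.toNat : Nat) : Int) := by exact_mod_cast h1
    rw [hdn] at this
    push_cast at this
    nlinarith [this]
  · have : ((d.toNat : Nat) : Int) < ((Nat.sqrt d.toNat + 1) ^ 2 : Nat) := by
      exact_mod_cast h2
    rw [hdn] at this
    push_cast at this
    nlinarith [this]

-- The bracketing inequalities determine Int.sqrt uniquely among nonnegative integers.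
theorem int_sqrt_unique (d c : Int) (hd : 0 ≤ d) (hc : 0 ≤ c)
    (h1 : c * c ≤ d) (h2 : d < (c + 1) * (c + 1)) : c = Int.sqrt d := by
  have hcn : ((c.toNat : Nat) : Int) = c := Int.toNat_of_nonneg hc
  have hdn : ((d.toNat : Nat) : Int) = d := Int.toNat_of_nonneg hd
  have hm : c.toNat ^ 2 ≤ d.toNat := by
    have : ((c.toNat ^ 2 : Nat) : Int) ≤ ((d.toNat : Nat) : Int) := by
      push_cast
      rw [hcn, hdn, pow_two]
      exact h1
    exact_mod_cast this
  have hm2 : d.toNat < (c.toNat + 1) ^ 2 := by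
    have : ((d.toNat : Nat) : Int) < (((c.toNat + 1) ^ 2 : Nat) : Int) := by
      push_cast
      rw [hcn, hdn, pow_two]
      exact h2
    exact_mod_cast this
  have hle : c.toNat ≤ Nat.sqrt d.toNat := Nat.le_sqrt'.mpr hm
  have hlt : Nat.sqrt d.toNat < c.toNat + 1 := Nat.sqrt_lt'.mpr hm2
  unfold Int.sqrt
  omega

theorem int_sqrt_le_self (d : Int) (hd : 1 ≤ d) : Int.sqrt d ≤ d := by
  unfold Int.sqrt
  have := Nat.sqrt_le_self d.toNat
  omega

theorem int_sqrt_pos (d : Int) (hd : 1 ≤ d) : 1 ≤ Int.sqrt d := by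
  unfold Int.sqrt
  have : 0 < Nat.sqrt d.toNat := Nat.sqrt_pos.mpr (by omega)
  omega

-- A's loop, started anywhere between 1 and √d, lands exactly on √d.
theorem centauriLoop_eq (d : Int) (hd : 1 ≤ d) :
    ∀ (k : Nat) (c : Int), (Int.sqrt d - c).toNat = k → 1 ≤ c → c ≤ Int.sqrt d →
      centauriLoop d c = Int.sqrt d := by
  intro k
  induction k with
  | zero =>
    intro c hk h1 h2
    have hceq : c = Int.sqrt d := by omega
    subst hceq
    obtain ⟨hb1, hb2⟩ := int_sqrt_bounds d (by omega)
    rw [centauriLoop]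
    simp only [pow_two]
    rw [if_pos ⟨hb1, hb2⟩]
  | succ n ih =>
    intro c hk h1 h2
    have hclt : c < Int.sqrt d := by omega
    rw [centauriLoop]
    by_cases hcond : c ^ 2 ≤ d ∧ d < (c + 1) ^ 2
    · exfalso
      have : c = Int.sqrt d := by
        apply int_sqrt_unique d c (by omega) (by omega)
        · have := hcond.1; nlinarith [hcond.1]
        · have := hcond.2; nlinarith [hcond.2]
      omega
    · rw [if_neg hcond]
      have hguard : c < d := lt_of_lt_of_le hclt (int_sqrt_le_self d hd)
      rw [if_pos hguard]
      exact ih (c + 1) (by omega) (by omega) (by omega)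

-- ===== VERDICT (by name: the statement is the Claim_ definition above) =====
theorem centauri_spec : Claim_equal_centauri := by
  intro x y _ hpre
  unfold Spec_centauri centauri centauri_alt
  have hd : 1 ≤ y - x := hpre
  set d := y - x with hdef
  have hloop : centauriLoop d 1 = Int.sqrt d :=
    centauriLoop_eq d hd (Int.sqrt d - 1).toNat 1 rfl le_rfl (int_sqrt_pos d hd)
  simp only [hloop]
  set c := Int.sqrt d with hc
  obtain ⟨hb1, hb2⟩ := int_sqrt_bounds d (by omega)
  rw [← hc] at hb1 hb2
  have hsq : c ^ 2 = c * c := pow_two c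
  by_cases h1 : c * c = d
  · rw [if_pos (by omega : c ^ 2 = d), if_pos h1]; ring
  · rw [if_neg (by omega : ¬ c ^ 2 = d), if_neg h1]
    by_cases h2 : d ≤ c * c + c
    · rw [if_pos (by omega : c ^ 2 < d ∧ d ≤ c ^ 2 + c), if_pos h2]; ring
    · rw [if_neg (by omega : ¬ (c ^ 2 < d ∧ d ≤ c ^ 2 + c)), if_neg h2]; ring
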